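-- pv_equiv track=rewrite | github.com/akash-verma-au16/attainu_course | assignments/week07/day03/ANS-4.py | solve
-- ===== SOURCE A (Python) =====
-- def solve(s,t):
--     n = len(s)
--     collection = []
--     c = 0
--     for i in range(n):
--         for j in range(i, n + 1):
--             temp = s[i : j]
--             if temp != "" and len(temp) > 1:
--                 if not is_repeated(temp):
--                     for k in temp:
--                         if k in t:
--                             c += 1
--                     if c == len(t):
--                         collection.append(temp)
--                     c = 0
--     return collection
--
-- def  is_repeated(s):
--     map = {}
--     for character in s:
--         if character not in map:
--             map[character]=1
--         else:
--             return True
--     return False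
-- ===== SOURCE B (Python) =====
-- def solve(s, t):
--     # Per start index i, grow the window while its chars stay distinct
--     # (break at the first duplicate: every longer window repeats too),
--     # tracking incrementally how many window chars occur in t.
--     n = len(s)
--     need = len(t)
--     tset = set(t)
--     res = []
--     for i in range(n):
--         seen = set()
--         c = 0
--         for j in range(i, n):
--             ch = s[j]
--             if ch in seen:
--                 break
--             seen.add(ch)
--             if ch in tset:
--                 c += 1
--             if j > i and c == need:
--                 res.append(s[i:j + 1])
--     return res
-- ===== Notes on version B (the rewrite author's own statement) =====
-- stated objective: faster
-- what changed: replaces the enumerate-every-substring-then-recheck-distinctness scan with a per-start sliding window that breaks at the first duplicate character and tracks the count of t-member characters incrementally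
import Mathlib
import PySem

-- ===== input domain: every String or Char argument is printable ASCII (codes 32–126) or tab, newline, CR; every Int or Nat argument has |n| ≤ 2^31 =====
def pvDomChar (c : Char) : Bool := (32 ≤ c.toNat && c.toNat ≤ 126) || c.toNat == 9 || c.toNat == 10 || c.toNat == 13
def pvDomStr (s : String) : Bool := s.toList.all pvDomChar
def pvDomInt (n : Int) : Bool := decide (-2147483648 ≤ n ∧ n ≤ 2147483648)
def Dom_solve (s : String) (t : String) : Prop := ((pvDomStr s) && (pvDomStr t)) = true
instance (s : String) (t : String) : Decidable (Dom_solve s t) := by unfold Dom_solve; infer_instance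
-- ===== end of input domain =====

-- B replaces A's enumerate-every-substring scan by a per-start sliding window that
-- breaks at the first duplicate character and counts t-member characters incrementally (objective: faster).

-- ===== PORT A =====
-- helper is_repeated: dict of seen characters, early return on a repeat
def is_repeated_go (l : List Char) (m : PySem.Dict Char Int) : Bool :=
  match l with
  | [] => false
  | ch :: rest =>
      if m.contains ch = false then is_repeated_go rest (m.insert ch 1)
      else true

def is_repeated (s : String) : Bool := is_repeated_go s.toList PySem.Dict.empty

-- `k in t` for the 1-character string k drawn from temp is ported as membership of the
-- character in t's characters (exact: a length-1 substring occurs iff the character occurs).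
def solve (s : String) (t : String) : List String :=
  let n : Int := PySem.Str.len s
  let r :=
    (PySem.List.pyRange 0 n 1).foldl (fun (st : List String × Int) i =>
      (PySem.List.pyRange i (n + 1) 1).foldl (fun (st : List String × Int) j =>
        let temp := PySem.Str.slice s (some i) (some j)
        if temp ≠ "" ∧ 1 < PySem.Str.len temp then
          if is_repeated temp = false then
            let c := temp.toList.foldl
              (fun c k => if t.toList.contains k = true then c + 1 else c) st.2
            if c = PySem.Str.len t then (st.1 ++ [temp], (0 : Int)) else (st.1, (0 : Int))
          else st
        else st) st) (([], 0) : List String × Int)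
  r.1

-- ===== PORT B =====
-- inner `for j in range(i, n): ... break` of Source B as a recursion on j
def altGo (L : List Char) (tset : PySem.Set Char) (need : Int) (i : Nat) (j : Nat)
    (seen : PySem.Set Char) (c : Int) (acc : List String) : List String :=
  if h : j < L.length then
    let ch := L[j]
    if PySem.Set.contains seen ch then acc
    else
      let seen' := PySem.Set.add seen ch
      let c' := if PySem.Set.contains tset ch then c + 1 else c
      let acc' := if i < j ∧ c' = need
        then acc ++ [String.ofList ((L.drop i).take (j + 1 - i))]  -- s[i:j+1]
        else acc
      altGo L tset need i (j + 1) seen' c' acc'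
  else acc
  termination_by L.length - j

def solve_alt (s : String) (t : String) : List String :=
  let L := s.toList
  let need : Int := PySem.Str.len t
  let tset := PySem.Set.ofList t.toList
  (List.range L.length).foldl (fun acc i => altGo L tset need i i PySem.Set.empty 0 acc) []

-- ===== PRECONDITION & SPEC =====
def Spec_solve (s : String) (t : String) (out : List String) : Prop := out = solve_alt s t
instance (s : String) (t : String) (out : List String) : Decidable (Spec_solve s t out) := by unfold Spec_solve; infer_instance

-- ===== CLAIM (what is proved, stated in full; the proofs are below) =====
def Claim_equal_solve : Prop := ∀ (s : String) (t : String), Dom_solve s t → Spec_solve s t (solve s t)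

-- ===== LEMMAS AND PROOFS =====

-- the window s[i:j] as a list
def win (L : List Char) (i j : Nat) : List Char := (L.drop i).take (j - i)

-- the acceptance condition both programs implement for the substring s[i:j]
def winOk (L T : List Char) (i j : Nat) : Bool :=
  decide (1 < j - i) && (win L i j).Nodup && ((win L i j).countP (fun k => T.contains k) == T.length)

-- the strings appended for start index i (indexed by jj = end-1, as in B)
def contrib (L T : List Char) (i : Nat) : List String :=
  ((List.range' i (L.length - i)).filter (fun jj => winOk L T i (jj + 1))).map
    (fun jj => String.ofList (win L i (jj + 1)))

-- is_repeated is non-distinctness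
theorem isRep_go_eq_false_iff (l : List Char) (m : PySem.Dict Char Int) :
    is_repeated_go l m = false ↔ l.Nodup ∧ ∀ a ∈ l, m.contains a = false := by
  induction l generalizing m with
  | nil => simp [is_repeated_go]
  | cons ch rest ih =>
    rw [is_repeated_go]
    by_cases hm : m.contains ch = false
    · simp only [hm, if_true, ih, List.nodup_cons, List.mem_cons]
      constructor
      · rintro ⟨hnd, hall⟩
        have hall' : ∀ a ∈ rest, a ≠ ch ∧ m.contains a = false := by
          intro a ha
          have := hall a ha
          rw [PySem.Dict.contains_insert] at this
          simp only [Bool.or_eq_false_iff, beq_eq_false_iff_ne] at this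
          exact this
        refine ⟨⟨fun hmem => (hall' ch hmem).1 rfl, hnd⟩, ?_⟩
        rintro a (rfl | ha)
        · exact hm
        · exact (hall' a ha).2
      · rintro ⟨⟨hch, hnd⟩, hall⟩
        refine ⟨hnd, fun a ha => ?_⟩
        rw [PySem.Dict.contains_insert]
        have hne : a ≠ ch := fun h => hch (h ▸ ha)
        simp [hne, hall a (Or.inr ha)]
    · simp only [hm, if_false]
      simp only [Bool.not_eq_false] at hm
      constructor
      · intro h; exact absurd h (by simp)
      · rintro ⟨-, hall⟩
        exact absurd (hall ch (List.mem_cons_self)) (by simp [hm])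

theorem isRep_eq_false_iff (w : List Char) :
    is_repeated (String.ofList w) = false ↔ w.Nodup := by
  rw [is_repeated]
  simp [isRep_go_eq_false_iff, PySem.Dict.contains_empty]

-- nodup is antitone under take
theorem not_nodup_take_of_le {α : Type} (l : List α) {a b : Nat} (hab : a ≤ b)
    (h : ¬ (l.take a).Nodup) : ¬ (l.take b).Nodup := by
  intro hb
  exact h (by simpa [Nat.min_eq_left hab, List.take_take] using hb.sublist (List.take_sublist a (l.take b)))

-- growing the window by one character
theorem win_succ (L : List Char) (i j : Nat) (hij : i ≤ j) (hj : j < L.length) :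
    win L i (j + 1) = win L i j ++ [L[j]] := by
  unfold win
  have h1 : j + 1 - i = (j - i) + 1 := by omega
  have h2 : j - i < (L.drop i).length := by rw [List.length_drop]; omega
  rw [h1, List.take_succ_eq_append_getElem h2]
  simp only [List.getElem_drop, List.append_cancel_left_eq]
  have h3 : i + (j - i) = j := by omega
  simp [getElem_congr rfl h3]

-- a foldl whose state's second component is re-established as 0 at every step
theorem foldl_pair_zero {α : Type} (l : List α) (g : List String × Int → α → List String × Int)
    (h : List String → α → List String)
    (hg : ∀ acc x, x ∈ l → g (acc, 0) x = (h acc x, 0)) (acc : List String) :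
    l.foldl g (acc, 0) = (l.foldl h acc, 0) := by
  induction l generalizing acc with
  | nil => rfl
  | cons x xs ih =>
    simp only [List.foldl_cons]
    rw [hg acc x (List.mem_cons_self), ih (fun a y hy => hg a y (List.mem_cons_of_mem _ hy))]

theorem A_inner (s t : String) (i : Nat) (hi : i < s.toList.length) (acc : List String) :
    (PySem.List.pyRange (i : Int) ((s.toList.length : Int) + 1) 1).foldl
      (fun (st : List String × Int) j =>
        let temp := PySem.Str.slice s (some (i : Int)) (some j)
        if temp ≠ "" ∧ 1 < PySem.Str.len temp then
          if is_repeated temp = false then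
            let c := temp.toList.foldl
              (fun c k => if t.toList.contains k = true then c + 1 else c) st.2
            if c = PySem.Str.len t then (st.1 ++ [temp], (0 : Int)) else (st.1, (0 : Int))
          else st
        else st) (acc, 0)
      = (acc ++ contrib s.toList t.toList i, 0) := by
  rw [PySem.List.pyRange_one, List.foldl_map]
  have hnn : (((s.toList.length : Int) + 1) - (i : Int)).toNat = s.toList.length + 1 - i := by
    omega
  rw [hnn]
  rw [foldl_pair_zero _ _
    (fun acc k => if winOk s.toList t.toList i (i + k) = true
      then acc ++ [String.ofList (win s.toList i (i + k))] else acc) ?step]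
  case step =>
    intro a k hk
    rw [List.mem_range] at hk
    have hik : ((i : Int) + (k : Int)) = ((i + k : Nat) : Int) := by push_cast; ring
    have htemp : PySem.Str.slice s (some (i : Int)) (some ((i : Int) + (k : Int)))
        = String.ofList (win s.toList i (i + k)) := by
      rw [String.ext_iff]
      simp only [PySem.Str.slice, PySem.Chars.slice_eq_listSlice]
      rw [hik, PySem.List.slice_natCast]
      simp [win, Nat.add_sub_cancel_left]
    simp only [htemp]
    have hwl : (win s.toList i (i + k)).length = k := by
      rw [win, List.length_take, List.length_drop]
      omega
    have hcond1 : (String.ofList (win s.toList i (i + k)) ≠ "" ∧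
        1 < PySem.Str.len (String.ofList (win s.toList i (i + k)))) ↔ 1 < k := by
      constructor
      · rintro ⟨-, h2⟩
        simp at h2
        omega
      · intro h1
        constructor
        · rw [Ne, String.ext_iff]
          simp
          intro hnil
          rw [← List.length_eq_zero_iff] at hnil
          omega
        · simp
          omega
    by_cases h1 : 1 < k
    · rw [if_pos (hcond1.mpr h1)]
      by_cases h2 : (win s.toList i (i + k)).Nodup
      · rw [if_pos ((isRep_eq_false_iff _).mpr h2)]
        have hkey : (((String.ofList (win s.toList i (i + k))).toList.foldl
              (fun c ch => if t.toList.contains ch = true then c + 1 else c) (0 : Int))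
              = PySem.Str.len t)
            ↔ winOk s.toList t.toList i (i + k) = true := by
          rw [PySem.List.foldl_if_add_one]
          simp [winOk, Nat.add_sub_cancel_left, h1, h2,
            show t.toList.contains = (fun ch => decide (ch ∈ t.toList)) from
              by funext ch; simp]
        by_cases h3 : winOk s.toList t.toList i (i + k) = true
        · rw [if_pos (hkey.mpr h3), if_pos h3]
        · rw [if_neg (fun h => h3 (hkey.mp h)), if_neg h3]
      · rw [if_neg, if_neg]
        · simp [winOk, h2]
        · rw [isRep_eq_false_iff]
          exact h2
    · rw [if_neg (fun h => h1 (hcond1.mp h)), if_neg]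
      simp [winOk, Nat.add_sub_cancel_left]
      omega
  · congr 1
    have hsp : s.toList.length + 1 - i = (s.toList.length - i) + 1 := by omega
    rw [PySem.List.foldl_append_if, hsp, List.range_succ_eq_map, List.filter_cons]
    have hp0 : winOk s.toList t.toList i (i + 0) = false := by
      simp [winOk]
    rw [contrib, List.range'_eq_map_range]
    simp only [hp0, Bool.false_eq_true, if_false, List.filter_map, List.map_map]
    rfl

theorem contains_ofList_eq (T : List Char) (a : Char) :
    PySem.Set.contains (PySem.Set.ofList T) a = T.contains a := by
  rw [Bool.eq_iff_iff, PySem.Set.contains_iff, PySem.Set.mem_ofList, List.contains_iff_mem]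

theorem altGo_eq (L T : List Char) (i : Nat) (d : Nat) :
    ∀ (j : Nat) (seen : PySem.Set Char) (c : Int) (acc : List String),
    d = L.length - j → i ≤ j →
    (∀ a, a ∈ seen ↔ a ∈ win L i j) →
    (win L i j).Nodup →
    c = ((win L i j).countP (fun k => T.contains k) : Int) →
    altGo L (PySem.Set.ofList T) (T.length : Int) i j seen c acc
      = acc ++ ((List.range' j (L.length - j)).filter (fun jj => winOk L T i (jj + 1))).map
          (fun jj => String.ofList (win L i (jj + 1))) := by
  induction d with
  | zero =>
    intro j seen c acc hd hij hseen hnd hc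
    have hj : ¬ j < L.length := by omega
    rw [altGo, dif_neg hj]
    simp [show L.length - j = 0 by omega]
  | succ d ih =>
    intro j seen c acc hd hij hseen hnd hc
    have hj : j < L.length := by omega
    rw [altGo, dif_pos hj]
    by_cases hmem : L[j] ∈ win L i j
    · have hcont : PySem.Set.contains seen L[j] = true :=
        (PySem.Set.contains_iff seen L[j]).mpr ((hseen L[j]).mpr hmem)
      simp only [hcont, if_true]
      have hfalse : ∀ jj ∈ List.range' j (L.length - j), ¬ winOk L T i (jj + 1) = true := by
        intro jj hjj
        rw [List.mem_range'_1] at hjj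
        have hnd1 : ¬ (win L i (j + 1)).Nodup := by
          rw [win_succ L i j hij hj]
          simp [List.nodup_append, hmem]
        have hndjj : ¬ (win L i (jj + 1)).Nodup := by
          have := not_nodup_take_of_le (L.drop i) (show j + 1 - i ≤ jj + 1 - i by omega) hnd1
          exact this
        simp [winOk, hndjj]
      rw [List.filter_eq_nil_iff.mpr hfalse]
      simp
    · have hcont : PySem.Set.contains seen L[j] = false := by
        rw [← Bool.not_eq_true, PySem.Set.contains_iff]
        exact fun h => hmem ((hseen L[j]).mp h)
      simp only [hcont, Bool.false_eq_true, if_false, contains_ofList_eq]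
      have hw' : win L i (j + 1) = win L i j ++ [L[j]] := win_succ L i j hij hj
      have hnd' : (win L i (j + 1)).Nodup := by
        rw [hw', List.nodup_append]
        refine ⟨hnd, List.nodup_singleton _, ?_⟩
        intro a ha b hb hab
        have hb' : b = L[j] := by simpa using hb
        exact hmem (hb' ▸ hab ▸ ha)
      have hc' : (if T.contains L[j] = true then c + 1 else c)
          = ((win L i (j + 1)).countP (fun k => T.contains k) : Int) := by
        rw [hw', List.countP_append, hc]
        have hone : List.countP (fun k => T.contains k) [L[j]]
            = if T.contains L[j] = true then 1 else 0 := by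
          by_cases ht : T.contains L[j] = true <;> simp [List.countP_cons, ht]
        rw [hone]
        by_cases ht : T.contains L[j] = true
        · rw [if_pos ht, if_pos ht]; push_cast; ring
        · rw [if_neg ht, if_neg ht]; push_cast; ring
      have hcond : (i < j ∧ (if T.contains L[j] = true then c + 1 else c) = (T.length : Int))
          ↔ winOk L T i (j + 1) = true := by
        rw [hc']
        simp only [winOk, Bool.and_eq_true, decide_eq_true_eq, beq_iff_eq]
        constructor
        · rintro ⟨h1, h2⟩; exact ⟨⟨by omega, by simpa using hnd'⟩, by exact_mod_cast h2⟩
        · rintro ⟨⟨h1, -⟩, h2⟩; exact ⟨by omega, by exact_mod_cast h2⟩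
      have hseen' : ∀ a, a ∈ PySem.Set.add seen L[j] ↔ a ∈ win L i (j + 1) := by
        intro a
        rw [PySem.Set.mem_add, hw', List.mem_append, List.mem_singleton, hseen]
      have hrec := ih (j + 1) (PySem.Set.add seen L[j])
        (if T.contains L[j] = true then c + 1 else c)
        (if i < j ∧ (if T.contains L[j] = true then c + 1 else c) = (T.length : Int)
          then acc ++ [String.ofList ((L.drop i).take (j + 1 - i))] else acc)
        (by omega) (by omega) hseen' hnd' hc'
      rw [hrec]
      have hsplit : L.length - j = (L.length - (j + 1)) + 1 := by omega
      rw [hsplit, List.range'_succ, List.filter_cons]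
      by_cases hok : winOk L T i (j + 1) = true
      · rw [if_pos (hcond.mpr hok), if_pos hok]
        simp [win, List.append_assoc]
      · rw [if_neg (fun h => hok (hcond.mp h)), if_neg hok]

theorem B_main (s t : String) :
    solve_alt s t = (List.range s.toList.length).foldl
      (fun acc i => acc ++ contrib s.toList t.toList i) [] := by
  rw [solve_alt]
  apply PySem.List.foldl_congr_mem
  intro acc i hi
  rw [List.mem_range] at hi
  have hwin : win s.toList i i = [] := by simp [win]
  have hlen : PySem.Str.len t = (t.toList.length : Int) := by simp
  rw [hlen]
  rw [altGo_eq s.toList t.toList i (s.toList.length - i) i PySem.Set.empty 0 acc rfl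
    (Nat.le_refl i) (by simp [hwin, PySem.Set.empty]) (by simp [hwin]) (by simp [hwin])]
  rfl

theorem A_main (s t : String) :
    solve s t = (List.range s.toList.length).foldl
      (fun acc i => acc ++ contrib s.toList t.toList i) [] := by
  rw [solve]
  have hn : PySem.Str.len s = (s.toList.length : Int) := by simp
  rw [hn, PySem.List.pyRange_zero_nat, List.foldl_map]
  rw [foldl_pair_zero _ _ (fun acc i => acc ++ contrib s.toList t.toList i) ?step]
  case step =>
    intro acc i hi
    rw [List.mem_range] at hi
    exact A_inner s t i hi acc

-- ===== VERDICT (by name: the statement is the Claim_ definition above) =====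
theorem solve_spec : Claim_equal_solve := by
  intro s t _
  unfold Spec_solve
  rw [A_main, B_main]
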